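-- pv_equiv track=rewrite | github.com/jgYro/b2vNN | 3d.py | create_3d_coordinates_from_bytes
-- ===== SOURCE A (Python) =====
-- def create_3d_coordinates_from_bytes(bytes_data):
--     coordinates = []
--     for i in range(0, len(bytes_data) - (len(bytes_data) % 3), 3):
--         x = bytes_data[i]
--         y = bytes_data[i + 1]
--         z = bytes_data[i + 2]
--         coordinates.append((x, y, z))
--     return coordinates
-- ===== SOURCE B (Python) =====
-- def create_3d_coordinates_from_bytes(bytes_data):
--     it = iter(bytes_data)
--     return list(zip(it, it, it))
-- ===== Notes on version B (the rewrite author's own statement) =====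
-- stated objective: idiomatic
-- what changed: Replaced the index-arithmetic loop (length truncated to a multiple of 3, indexing i, i+1, i+2) by the shared-iterator grouper idiom list(zip(it, it, it)), which consumes three elements per tuple and drops leftovers with no length math.
import Mathlib
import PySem

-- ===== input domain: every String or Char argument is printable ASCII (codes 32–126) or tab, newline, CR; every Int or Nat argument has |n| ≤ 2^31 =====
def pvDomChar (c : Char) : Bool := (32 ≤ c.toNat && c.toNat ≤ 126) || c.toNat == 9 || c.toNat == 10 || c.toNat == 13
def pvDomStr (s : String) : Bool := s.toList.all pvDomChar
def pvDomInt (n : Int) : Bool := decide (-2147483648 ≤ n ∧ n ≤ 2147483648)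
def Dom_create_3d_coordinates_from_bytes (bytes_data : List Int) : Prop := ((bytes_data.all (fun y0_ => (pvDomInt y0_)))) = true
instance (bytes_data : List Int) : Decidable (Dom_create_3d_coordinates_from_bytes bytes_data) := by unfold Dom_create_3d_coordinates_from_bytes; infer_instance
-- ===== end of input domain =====

-- B replaces A's index-arithmetic loop by the grouper idiom (consume three elements per tuple); same O(n) cost, proved equal on all inputs.


-- ===== PORT A =====
-- literal port of A: for i in range(0, len - len % 3, 3): append (xs[i], xs[i+1], xs[i+2]).
-- xs[i] is PySem.List.pyGet?; the none branch (IndexError) is unreachable, proved below.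
def create_3d_coordinates_from_bytes (bytes_data : List Int) : List (Int × Int × Int) :=
  (PySem.List.pyRange 0 ((bytes_data.length : Int) - PySem.Int.mod (bytes_data.length : Int) 3) 3).foldl
    (fun coordinates i =>
      match PySem.List.pyGet? bytes_data i, PySem.List.pyGet? bytes_data (i + 1),
            PySem.List.pyGet? bytes_data (i + 2) with
      | some x, some y, some z => coordinates ++ [(x, y, z)]
      | _, _, _ => coordinates)
    []

-- ===== PORT B =====
-- port of Source B: list(zip(it, it, it)) on one shared iterator = take three at a time, drop the leftover
def create_3d_coordinates_from_bytes_alt : List Int → List (Int × Int × Int)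
  | x :: y :: z :: rest => (x, y, z) :: create_3d_coordinates_from_bytes_alt rest
  | _ => []

-- ===== PRECONDITION & SPEC =====
def Spec_create_3d_coordinates_from_bytes (bytes_data : List Int) (out : List (Int × Int × Int)) : Prop := out = create_3d_coordinates_from_bytes_alt bytes_data
instance (bytes_data : List Int) (out : List (Int × Int × Int)) : Decidable (Spec_create_3d_coordinates_from_bytes bytes_data out) := by unfold Spec_create_3d_coordinates_from_bytes; infer_instance

-- ===== CLAIM (what is proved, stated in full; the proofs are below) =====
def Claim_equal_create_3d_coordinates_from_bytes : Prop := ∀ (bytes_data : List Int), Dom_create_3d_coordinates_from_bytes bytes_data → Spec_create_3d_coordinates_from_bytes bytes_data (create_3d_coordinates_from_bytes bytes_data)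

-- ===== LEMMAS AND PROOFS =====

-- The stepped range of A is 0, 3, …, 3*(len/3 - 1).
lemma pvRangeA (xs : List Int) :
    PySem.List.pyRange 0 ((xs.length : Int) - PySem.Int.mod (xs.length : Int) 3) 3 =
      (List.range (xs.length / 3)).map (fun k : Nat => ((3 * k : Nat) : Int)) := by
  rw [PySem.List.pyRange_of_pos _ _ (by norm_num : (0:Int) < 3)]
  have hcount : (if (0:Int) < (xs.length : Int) - PySem.Int.mod (xs.length : Int) 3 then
      (((xs.length : Int) - PySem.Int.mod (xs.length : Int) 3 - 0 + 3 - 1) / 3).toNat else 0)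
      = xs.length / 3 := by
    simp only [PySem.Int.mod]
    rw [Int.fmod_eq_emod]
    split_ifs <;> omega
  rw [hcount]
  exact List.map_congr_left (fun k _ => by push_cast; ring)

lemma pvFoldPush {α β : Type} (g : β → α) (l : List β) (acc : List α) :
    l.foldl (fun a k => a ++ [g k]) acc = acc ++ l.map g := by
  induction l generalizing acc with
  | nil => simp
  | cons b t ih => simp [List.foldl_cons, ih]

-- all three lookups succeed for k < len/3
lemma pvGetsome (xs : List Int) (k : Nat) (j : Nat) (hj : j < 3) (hk : k < xs.length / 3) :
    PySem.List.pyGet? xs ((3 * k + j : Nat) : Int) = some (xs.getD (3 * k + j) 0) := by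
  have hlt : 3 * k + j < xs.length := by omega
  rw [PySem.List.pyGet?_natCast]
  simp [List.getD_eq_getElem?_getD, List.getElem?_eq_getElem hlt]

lemma pvMapChunk (xs : List Int) :
    (List.range (xs.length / 3)).map
        (fun k => (xs.getD (3 * k) 0, xs.getD (3 * k + 1) 0, xs.getD (3 * k + 2) 0)) =
      create_3d_coordinates_from_bytes_alt xs := by
  fun_induction create_3d_coordinates_from_bytes_alt xs with
  | case1 x y z rest ih =>
    have hq : (x :: y :: z :: rest).length / 3 = rest.length / 3 + 1 := by
      simp [List.length_cons]; omega
    rw [hq, List.range_succ_eq_map, List.map_cons, List.map_map]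
    simp only [Nat.mul_zero, List.getD_cons_zero, List.getD_cons_succ]
    rw [← ih]
    congr 1
  | case2 l h =>
    rcases l with _ | ⟨a, _ | ⟨b, _ | ⟨c, t⟩⟩⟩
    · simp
    · simp
    · simp
    · exact absurd rfl (h a b c t)

-- ===== VERDICT (by name: the statement is the Claim_ definition above) =====
theorem create_3d_coordinates_from_bytes_spec : Claim_equal_create_3d_coordinates_from_bytes := by
  intro xs _
  unfold Spec_create_3d_coordinates_from_bytes create_3d_coordinates_from_bytes
  rw [pvRangeA, List.foldl_map]
  refine Eq.trans (PySem.List.foldl_congr_mem _ _ (fun (a : List (Int × Int × Int)) (k : Nat) =>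
        a ++ [(xs.getD (3 * k) 0, xs.getD (3 * k + 1) 0, xs.getD (3 * k + 2) 0)]) _ ?_) ?_
  · intro acc k hk
    simp only [List.mem_range] at hk
    have h0 := pvGetsome xs k 0 (by omega) hk
    have h1 := pvGetsome xs k 1 (by omega) hk
    have h2 := pvGetsome xs k 2 (by omega) hk
    have e1 : ((3 * k : Nat) : Int) + 1 = ((3 * k + 1 : Nat) : Int) := by push_cast; ring
    have e2 : ((3 * k : Nat) : Int) + 2 = ((3 * k + 2 : Nat) : Int) := by push_cast; ring
    simp only [Nat.add_zero] at h0
    rw [e1, e2, h0, h1, h2]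
  · rw [pvFoldPush, pvMapChunk]
    simp
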